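-- pv_equiv track=rewrite | github.com/NazBen/impact-of-dependence | dependence/utils.py | get_pair
-- ===== SOURCE A (Python) =====
-- def get_pair(dim, index, with_plus=True):
--     """ Get the pair of variables from a given index.
--     """
--     k = 0
--     for i in range(1, dim):
--         for j in range(i):
--             if k == index:
--                 if with_plus:
--                     return [i+1, j+1]
--                 else:
--                     return [i, j]
--             k+=1
-- ===== SOURCE B (Python) =====
-- def _isqrt(n):
--     """Integer square root by recursion on n // 4 (no imports needed)."""
--     if n < 1:
--         return 0
--     r = 2 * _isqrt(n // 4)
--     return r + 1 if (r + 1) * (r + 1) <= n else r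
--
--
-- def get_pair(dim, index, with_plus=True):
--     """ Get the pair of variables from a given index.
--     """
--     if dim < 2 or index < 0 or index >= dim * (dim - 1) // 2:
--         return None
--     t = _isqrt(8 * index + 1)
--     i = (t + 1) // 2
--     j = index - i * (i - 1) // 2
--     if with_plus:
--         return [i + 1, j + 1]
--     return [i, j]
-- ===== Notes on version B (the rewrite author's own statement) =====
-- stated objective: faster
-- what changed: Replaces the nested O(dim^2) linear scan over all pairs by an O(log index) closed form: the row is recovered by inverting the triangular number with an integer square root, the column by subtraction.
import Mathlib
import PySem

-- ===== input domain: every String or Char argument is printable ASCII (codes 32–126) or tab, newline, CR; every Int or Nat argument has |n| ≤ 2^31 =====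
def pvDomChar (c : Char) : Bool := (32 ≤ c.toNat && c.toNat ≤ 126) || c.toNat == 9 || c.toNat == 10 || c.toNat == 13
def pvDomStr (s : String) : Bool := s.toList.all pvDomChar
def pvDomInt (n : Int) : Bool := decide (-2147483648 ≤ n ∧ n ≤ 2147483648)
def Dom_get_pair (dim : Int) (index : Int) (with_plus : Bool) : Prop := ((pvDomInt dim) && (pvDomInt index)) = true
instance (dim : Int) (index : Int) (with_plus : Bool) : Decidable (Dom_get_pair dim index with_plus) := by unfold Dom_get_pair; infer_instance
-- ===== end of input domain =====

-- B replaces A's O(dim^2) scan over all pairs by an O(log index) closed form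
-- (row recovered by an integer square root, column by subtraction).

-- ===== PORT A =====
-- A's nested loops with early return, as recursion: innerA is 'for j in range(i)'
-- (j the loop variable, k the counter), outerA is 'for i in range(1, dim)';
-- Sum.inl k = still searching, Sum.inr res = returned.
def innerA (index : Int) (wp : Bool) (i : Int) (j : Int) (k : Int) : Sum Int (List Int) :=
  if h : j < i then
    if k = index then Sum.inr (if wp then [i + 1, j + 1] else [i, j])
    else innerA index wp i (j + 1) (k + 1)
  else Sum.inl k
termination_by (i - j).toNat
decreasing_by omega

def outerA (index : Int) (wp : Bool) (dim : Int) (i : Int) (k : Int) : Option (List Int) :=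
  if h : i < dim then
    match innerA index wp i 0 k with
    | Sum.inr res => some res
    | Sum.inl k' => outerA index wp dim (i + 1) k'
  else none
termination_by (dim - i).toNat
decreasing_by omega

def get_pair (dim : Int) (index : Int) (with_plus : Bool) : Option (List Int) :=
  outerA index with_plus dim 1 0

-- ===== PORT B =====
-- Source B's _isqrt: recursion on n // 4.  Carried out on n.toNat (n < 1 is the base
-- case, so only nonnegative n recurse and // agrees with Nat division); the Nat
-- measure makes the recursion's termination evident.
def isqrtAux (n : Nat) : Nat :=
  if n < 1 then 0
  else
    let r := 2 * isqrtAux (n / 4)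
    if (r + 1) * (r + 1) ≤ n then r + 1 else r
decreasing_by exact Nat.div_lt_self (by omega) (by omega)

def pyIsqrt (n : Int) : Int :=
  if n < 1 then 0 else (isqrtAux n.toNat : Int)

def get_pair_alt (dim : Int) (index : Int) (with_plus : Bool) : Option (List Int) :=
  if dim < 2 ∨ index < 0 ∨ PySem.Int.floordiv (dim * (dim - 1)) 2 ≤ index then none
  else
    let t := pyIsqrt (8 * index + 1)
    let i := PySem.Int.floordiv (t + 1) 2
    let j := index - PySem.Int.floordiv (i * (i - 1)) 2
    some (if with_plus then [i + 1, j + 1] else [i, j])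

-- ===== PRECONDITION & SPEC =====
def Spec_get_pair (dim : Int) (index : Int) (with_plus : Bool) (out : Option (List Int)) : Prop := out = get_pair_alt dim index with_plus
instance (dim : Int) (index : Int) (with_plus : Bool) (out : Option (List Int)) : Decidable (Spec_get_pair dim index with_plus out) := by unfold Spec_get_pair; infer_instance

-- ===== CLAIM (what is proved, stated in full; the proofs are below) =====
def Claim_equal_get_pair : Prop := ∀ (dim : Int) (index : Int) (with_plus : Bool), Dom_get_pair dim index with_plus → Spec_get_pair dim index with_plus (get_pair dim index with_plus)

-- ===== LEMMAS AND PROOFS =====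

-- triangular number T n = n*(n-1)/2 = number of pairs before row n
def triN (n : Nat) : Int := ((n * (n - 1) / 2 : Nat) : Int)

-- the row/column the closed form assigns to a nonnegative index
def rowOf (n : Int) : Nat := (Nat.sqrt (8 * n.toNat + 1) + 1) / 2

def pairOf (n : Int) (wp : Bool) : List Int :=
  if wp then [(rowOf n : Int) + 1, (n - triN (rowOf n)) + 1]
  else [(rowOf n : Int), n - triN (rowOf n)]

lemma two_triN (n : Nat) : 2 * triN n = (n : Int) * ((n : Int) - 1) := by
  have he : Even (n * (n - 1)) := by
    rcases n with _ | m
    · simp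
    · simpa [Nat.succ_sub_one, Nat.mul_comm] using Nat.even_mul_succ_self m
  have h : 2 * (n * (n - 1) / 2) = n * (n - 1) := by
    obtain ⟨k, hk⟩ := he; omega
  unfold triN
  cases n with
  | zero => simp
  | succ m =>
    have h2 : ((2 * ((m + 1) * ((m + 1) - 1) / 2) : Nat) : Int)
        = (((m + 1) * ((m + 1) - 1) : Nat) : Int) := by exact_mod_cast h
    push_cast [Nat.succ_sub_one] at h2 ⊢
    rw [h2]; ring

lemma triN_succ (n : Nat) : triN (n + 1) = triN n + n := by
  have h1 := two_triN n
  have h2 := two_triN (n + 1)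
  push_cast at h2
  nlinarith [h1, h2]

lemma triN_nonneg (n : Nat) : 0 ≤ triN n := by unfold triN; positivity

lemma isqrtAux_eq_sqrt (n : Nat) : isqrtAux n = Nat.sqrt n := by
  induction n using Nat.strong_induction_on with
  | _ n ih =>
    unfold isqrtAux
    by_cases h : n < 1
    · interval_cases n; simp
    · simp only [if_neg h]
      have hrec : isqrtAux (n / 4) = Nat.sqrt (n / 4) :=
        ih _ (Nat.div_lt_self (by omega) (by omega))
      rw [hrec]
      have hle : Nat.sqrt (n / 4) * Nat.sqrt (n / 4) ≤ n / 4 := Nat.sqrt_le _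
      have hlt : n / 4 < (Nat.sqrt (n / 4) + 1) * (Nat.sqrt (n / 4) + 1) :=
        Nat.lt_succ_sqrt _
      set r := 2 * Nat.sqrt (n / 4) with hr
      have h1 : r * r ≤ n := by
        calc r * r = 4 * (Nat.sqrt (n / 4) * Nat.sqrt (n / 4)) := by rw [hr]; ring
        _ ≤ 4 * (n / 4) := by omega
        _ ≤ n := by omega
      have h2 : n < (r + 2) * (r + 2) := by
        calc n < 4 * ((Nat.sqrt (n / 4) + 1) * (Nat.sqrt (n / 4) + 1)) := by omega
        _ = (r + 2) * (r + 2) := by rw [hr]; ring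
      by_cases hc : (r + 1) * (r + 1) ≤ n
      · rw [if_pos hc]
        have ha := Nat.le_sqrt.mpr hc
        have hb := Nat.sqrt_lt.mpr h2
        omega
      · rw [if_neg hc]
        have ha := Nat.le_sqrt.mpr h1
        have hb := Nat.sqrt_lt.mpr (show n < (r + 1) * (r + 1) by omega)
        omega

lemma rowOf_spec (n : Int) (hn : 0 ≤ n) :
    1 ≤ rowOf n ∧ triN (rowOf n) ≤ n ∧ n < triN (rowOf n + 1) := by
  have hnm : n = (n.toNat : Int) := by omega
  have hlo : Nat.sqrt (8 * n.toNat + 1) * Nat.sqrt (8 * n.toNat + 1) ≤ 8 * n.toNat + 1 :=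
    Nat.sqrt_le _
  have hhi : 8 * n.toNat + 1 < (Nat.sqrt (8 * n.toNat + 1) + 1) * (Nat.sqrt (8 * n.toNat + 1) + 1) :=
    Nat.lt_succ_sqrt _
  set m := n.toNat
  set s := Nat.sqrt (8 * m + 1) with hs
  have hs1 : 1 ≤ s := by
    rcases Nat.eq_zero_or_pos s with h0 | h0
    · rw [h0] at hhi; omega
    · exact h0
  have hrow : rowOf n = (s + 1) / 2 := rfl
  set i := (s + 1) / 2 with hi
  have hi1 : 1 ≤ i := by omega
  have hb1 : 2 * i ≤ s + 1 := by omega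
  have hb2 : s + 1 ≤ 2 * i + 1 := by omega
  -- move to Int
  have hI1 : (1 : Int) ≤ (i : Int) := by exact_mod_cast hi1
  have hloI : ((s : Int)) * (s : Int) ≤ 8 * (m : Int) + 1 := by exact_mod_cast hlo
  have hhiI : 8 * (m : Int) + 1 < ((s : Int) + 1) * ((s : Int) + 1) := by exact_mod_cast hhi
  have hb1I : 2 * (i : Int) ≤ (s : Int) + 1 := by exact_mod_cast hb1
  have hb2I : (s : Int) + 1 ≤ 2 * (i : Int) + 1 := by exact_mod_cast hb2
  have hsq1 : (2 * (i : Int) - 1) * (2 * (i : Int) - 1) ≤ (s : Int) * (s : Int) :=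
    mul_self_le_mul_self (by linarith) (by linarith)
  have hsq2 : ((s : Int) + 1) * ((s : Int) + 1) ≤ (2 * (i : Int) + 1) * (2 * (i : Int) + 1) :=
    mul_self_le_mul_self (by positivity) (by linarith)
  have c1 : (i : Int) * ((i : Int) - 1) ≤ 2 * (m : Int) := by nlinarith [hsq1, hloI]
  have c2 : 2 * (m : Int) < (i : Int) * ((i : Int) + 1) := by nlinarith [hsq2, hhiI]
  have t1 := two_triN i
  have t2 := two_triN (i + 1)
  push_cast at t2
  have t2' : 2 * triN (i + 1) = (i : Int) * ((i : Int) + 1) := by rw [t2]; ring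
  refine ⟨by rw [hrow]; exact hi1, ?_, ?_⟩
  · rw [hrow, hnm]; linarith
  · rw [hrow, hnm]; linarith

lemma triN_mono {a b : Nat} (h : a ≤ b) : triN a ≤ triN b := by
  unfold triN
  exact_mod_cast Nat.div_le_div_right (Nat.mul_le_mul h (by omega))

lemma rowOf_eq {n : Int} {a : Nat} (ha : 1 ≤ a)
    (h1 : triN a ≤ n) (h2 : n < triN (a + 1)) : rowOf n = a := by
  have hn : 0 ≤ n := le_trans (triN_nonneg a) h1
  obtain ⟨hr1, hr2, hr3⟩ := rowOf_spec n hn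
  by_contra hne
  rcases Nat.lt_or_ge (rowOf n) a with h | h
  · have := triN_mono (show rowOf n + 1 ≤ a by omega)
    omega
  · have := triN_mono (show a + 1 ≤ rowOf n by omega)
    omega

-- the inner loop: scanning row i from position j with counter k
lemma innerA_spec (index : Int) (wp : Bool) (i : Int) :
    ∀ (m : Nat) (j k : Int), (i - j).toNat = m →
    innerA index wp i j k =
      (if k ≤ index ∧ index < k + (i - j) then
        Sum.inr (if wp then [i + 1, (j + (index - k)) + 1] else [i, j + (index - k)])
      else Sum.inl (k + max (i - j) 0)) := by
  intro m
  induction m with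
  | zero =>
    intro j k hm
    rw [innerA, dif_neg (by omega), if_neg (by omega),
      show max (i - j) 0 = 0 by omega]
    norm_num
  | succ m ih =>
    intro j k hm
    have hj : j < i := by omega
    rw [innerA, dif_pos hj]
    by_cases hk : k = index
    · rw [if_pos hk,
        if_pos (show k ≤ index ∧ index < k + (i - j) from ⟨le_of_eq hk, by omega⟩)]
      subst hk
      norm_num
    · rw [if_neg hk, ih (j + 1) (k + 1) (by omega)]
      by_cases hc : k + 1 ≤ index ∧ index < k + 1 + (i - (j + 1))
      · rw [if_pos hc, if_pos (show k ≤ index ∧ index < k + (i - j) by constructor <;> omega)]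
        rw [show j + 1 + (index - (k + 1)) = j + (index - k) by ring]
      · rw [if_neg hc, if_neg (show ¬(k ≤ index ∧ index < k + (i - j)) by omega),
          show k + 1 + max (i - (j + 1)) 0 = k + max (i - j) 0 by omega]

-- the outer loop, rows a, a+1, …, a+c-1, entered with counter triN a
lemma outerA_spec (index : Int) (wp : Bool) (c : Nat) :
    ∀ a : Nat, 1 ≤ a →
    outerA index wp ((a + c : Nat) : Int) ((a : Nat) : Int) (triN a) =
      (if triN a ≤ index ∧ index < triN (a + c) then some (pairOf index wp) else none) := by
  induction c with
  | zero =>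
    intro a ha
    rw [outerA, dif_neg (by push_cast; omega)]
    simp only [Nat.add_zero]
    rw [if_neg (by omega)]
  | succ c ih =>
    intro a ha
    have hsucc := triN_succ a
    rw [outerA, dif_pos (by push_cast; omega),
      innerA_spec index wp ((a : Nat) : Int) a 0 (triN a) (by omega)]
    simp only [sub_zero, zero_add]
    by_cases h : triN a ≤ index ∧ index < triN a + (a : Int)
    · rw [if_pos h]
      have hrow : rowOf index = a := rowOf_eq ha h.1 (by omega)
      have hmono := triN_mono (show a + 1 ≤ a + (c + 1) by omega)
      rw [if_pos (show triN a ≤ index ∧ index < triN (a + (c + 1)) from ⟨h.1, by omega⟩)]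
      show some _ = some (pairOf index wp)
      unfold pairOf
      rw [hrow]
    · rw [if_neg h,
        show triN a + max ((a : Nat) : Int) 0 = triN (a + 1) by omega]
      show outerA index wp _ (((a : Nat) : Int) + 1) (triN (a + 1)) = _
      rw [show ((a : Nat) : Int) + 1 = (((a + 1 : Nat) : Nat) : Int) by push_cast; ring,
        show ((a + (c + 1) : Nat) : Int) = (((a + 1) + c : Nat) : Int) by push_cast; ring,
        ih (a + 1) (by omega)]
      have hmono := triN_mono (show a ≤ a + 1 by omega)
      rw [show (a + 1) + c = a + (c + 1) by omega]
      by_cases hc : triN (a + 1) ≤ index ∧ index < triN (a + (c + 1))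
      · rw [if_pos hc, if_pos ⟨by omega, hc.2⟩]
      · rw [if_neg hc, if_neg (fun hcc => hc ⟨by omega, hcc.2⟩)]

-- both programs, characterised by the same closed form
lemma triN_small {n : Nat} (h : n ≤ 1) : triN n = 0 := by
  rcases Nat.le_one_iff_eq_zero_or_eq_one.mp h with h0 | h0 <;> rw [h0] <;> decide

lemma get_pair_char (dim : Int) (index : Int) (wp : Bool) :
    get_pair dim index wp =
      if 0 ≤ index ∧ index < triN dim.toNat then some (pairOf index wp) else none := by
  unfold get_pair
  by_cases hd : dim ≤ 1
  · rw [outerA, dif_neg (by omega),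
      triN_small (show dim.toNat ≤ 1 by omega), if_neg (by omega)]
  · push_neg at hd
    set c := (dim - 1).toNat with hcdef
    have hc1 : 1 ≤ c := by omega
    have hc : dim = ((1 + c : Nat) : Int) := by push_cast; omega
    rw [hc]
    have H := outerA_spec index wp c 1 (le_refl 1)
    rw [show triN 1 = 0 from by decide] at H
    rw [show ((1 : Nat) : Int) = (1 : Int) from rfl] at H
    rw [H, Int.toNat_natCast]

lemma get_pair_alt_char (dim : Int) (index : Int) (wp : Bool) :
    get_pair_alt dim index wp =
      if 0 ≤ index ∧ index < triN dim.toNat then some (pairOf index wp) else none := by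
  unfold get_pair_alt
  by_cases hd : dim < 2
  · rw [if_pos (Or.inl hd), triN_small (show dim.toNat ≤ 1 by omega), if_neg (by omega)]
  · push_neg at hd
    have hfd : ∀ m : Nat, PySem.Int.floordiv ((m : Nat) : Int) 2 = ((m / 2 : Nat) : Int) :=
      fun m => by exact_mod_cast PySem.Int.floordiv_natCast m 2
    have htri : PySem.Int.floordiv (dim * (dim - 1)) 2 = triN dim.toNat := by
      have h2 : dim * (dim - 1) = ((dim.toNat * (dim.toNat - 1) : Nat) : Int) := by
        have e1 : ((dim.toNat - 1 : Nat) : Int) = dim - 1 := by omega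
        have e2 : ((dim.toNat : Nat) : Int) = dim := by omega
        calc dim * (dim - 1)
            = ((dim.toNat : Nat) : Int) * ((dim.toNat - 1 : Nat) : Int) := by rw [e1, e2]
          _ = ((dim.toNat * (dim.toNat - 1) : Nat) : Int) := (Nat.cast_mul _ _).symm
      rw [h2, hfd]
      rfl
    rw [htri]
    by_cases h1 : index < 0
    · rw [if_pos (Or.inr (Or.inl h1)), if_neg (by omega)]
    · by_cases h2 : triN dim.toNat ≤ index
      · rw [if_pos (Or.inr (Or.inr h2)), if_neg (by omega)]
      · rw [if_neg (by push_neg; exact ⟨by omega, by omega, by omega⟩),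
          if_pos (show 0 ≤ index ∧ index < triN dim.toNat by constructor <;> omega)]
        have hn : 0 ≤ index := by omega
        have hq : pyIsqrt (8 * index + 1)
            = ((Nat.sqrt (8 * index.toNat + 1) : Nat) : Int) := by
          unfold pyIsqrt
          rw [if_neg (by omega), isqrtAux_eq_sqrt,
            show (8 * index + 1).toNat = 8 * index.toNat + 1 by omega]
        simp only [hq]
        have hi : PySem.Int.floordiv (((Nat.sqrt (8 * index.toNat + 1) : Nat) : Int) + 1) 2
            = ((rowOf index : Nat) : Int) := by
          rw [show ((Nat.sqrt (8 * index.toNat + 1) : Nat) : Int) + 1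
              = ((Nat.sqrt (8 * index.toNat + 1) + 1 : Nat) : Int) by push_cast; ring,
            hfd]
          rfl
        simp only [hi]
        have hr1 : 1 ≤ rowOf index := (rowOf_spec index hn).1
        have hj : PySem.Int.floordiv (((rowOf index : Nat) : Int) * (((rowOf index : Nat) : Int) - 1)) 2
            = triN (rowOf index) := by
          have e1 : ((rowOf index - 1 : Nat) : Int) = ((rowOf index : Nat) : Int) - 1 := by omega
          rw [show ((rowOf index : Nat) : Int) * (((rowOf index : Nat) : Int) - 1)
              = ((rowOf index * (rowOf index - 1) : Nat) : Int) by rw [← e1]; push_cast [e1]; ring,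
            hfd]
          rfl
        simp only [hj]
        unfold pairOf
        cases wp <;> rfl

-- ===== VERDICT (by name: the statement is the Claim_ definition above) =====
theorem get_pair_spec : Claim_equal_get_pair := by
  intro dim index wp _
  unfold Spec_get_pair
  rw [get_pair_char, get_pair_alt_char]
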